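-- pv_equiv track=rewrite | github.com/zhejiushi-WY-ya/A-Simplified-Core-Workflow-for-Enhancing-RAG | lightrag_core_simplified/src/modules/retrieval_module.py | get_seed_nodes_from_keywords
-- ===== SOURCE A (Python) =====
-- def get_seed_nodes_from_keywords(graph, keywords):
--     nodes = set()
--     keyword_set = {keyword.lower() for keyword in keywords}
--     if not keyword_set:
--         return nodes
--
--     for node in graph.get("nodes", []):
--         name = node.get("name", "")
--         name_lower = name.lower()
--         description = str(node.get("description", "")).lower()
--         if any(keyword in name_lower or keyword in description for keyword in keyword_set):
--             nodes.add(name)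
--
--     return nodes
-- ===== SOURCE B (Python) =====
-- def get_seed_nodes_from_keywords(graph, keywords):
--     # Transposed strategy: precompute one lowered row per node, then one marking
--     # pass per keyword over a boolean vector, then collect the marked names.
--     result = set()
--     if not keywords:
--         return result
--     rows = [(node.get("name", ""),
--              node.get("name", "").lower(),
--              str(node.get("description", "")).lower())
--             for node in graph.get("nodes", [])]
--     marked = [False] * len(rows)
--     for keyword in keywords:
--         k = keyword.lower()
--         marked = [m or k in nl or k in dl
--                   for m, (_, nl, dl) in zip(marked, rows)]
--     for (name, _, _), m in zip(rows, marked):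
--         if m:
--             result.add(name)
--     return result
-- ===== Notes on version B (the rewrite author's own statement) =====
-- stated objective: alternative
-- what changed: B inverts the loop nesting: it precomputes a lowered (name, name_lower, description_lower) row per node once, then runs one vectorized marking pass over a boolean mark vector per keyword, and finally collects the marked names in node order, instead of A's per-node scan over the keyword set with short-circuit any().
import Mathlib
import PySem

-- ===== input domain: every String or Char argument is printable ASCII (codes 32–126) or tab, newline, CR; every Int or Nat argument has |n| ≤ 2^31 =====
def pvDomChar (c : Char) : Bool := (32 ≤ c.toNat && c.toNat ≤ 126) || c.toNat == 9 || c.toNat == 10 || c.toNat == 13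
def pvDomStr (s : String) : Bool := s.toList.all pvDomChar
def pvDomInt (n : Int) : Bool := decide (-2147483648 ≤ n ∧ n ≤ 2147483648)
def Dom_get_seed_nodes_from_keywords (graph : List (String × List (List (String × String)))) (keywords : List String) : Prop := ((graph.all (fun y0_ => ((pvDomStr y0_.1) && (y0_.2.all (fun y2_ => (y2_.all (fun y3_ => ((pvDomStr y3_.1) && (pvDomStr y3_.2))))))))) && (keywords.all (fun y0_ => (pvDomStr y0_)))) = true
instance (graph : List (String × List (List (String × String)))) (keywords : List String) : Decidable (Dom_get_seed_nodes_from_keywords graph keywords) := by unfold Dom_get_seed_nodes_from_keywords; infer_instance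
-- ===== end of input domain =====

-- B inverts the loop nesting (precomputed lowered rows + one boolean marking pass per keyword,
-- then collect marked names); objective: alternative (same asymptotic cost). Both programs are pure.

-- dict.get(k, dflt) on an association list: first match (shared helper for both ports)
def pvDictGetD {ν : Type} (d : List (String × ν)) (k : String) (dflt : ν) : ν :=
  (List.lookup k d).getD dflt

-- ===== PORT A =====
def get_seed_nodes_from_keywords (graph : List (String × List (List (String × String)))) (keywords : List String) : List String :=
  let nodes : PySem.Set String := PySem.Set.empty
  let keyword_set : PySem.Set String := PySem.Set.ofList (keywords.map PySem.Str.lower)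
  if keyword_set.isEmpty then nodes
  else
    (pvDictGetD graph "nodes" []).foldl
      (fun nodes node =>
        let name := pvDictGetD node "name" ""
        let name_lower := PySem.Str.lower name
        let description := PySem.Str.lower (pvDictGetD node "description" "")
        if keyword_set.any (fun keyword =>
             PySem.Str.isIn keyword name_lower || PySem.Str.isIn keyword description)
        then PySem.Set.add nodes name else nodes)
      nodes

-- ===== PORT B =====
-- one precomputed row per node: (name, name.lower(), str(description).lower())
def pvRow (node : List (String × String)) : String × String × String :=
  (pvDictGetD node "name" "", PySem.Str.lower (pvDictGetD node "name" ""),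
   PySem.Str.lower (pvDictGetD node "description" ""))

def get_seed_nodes_from_keywords_alt (graph : List (String × List (List (String × String)))) (keywords : List String) : List String :=
  let result : PySem.Set String := PySem.Set.empty
  if keywords.isEmpty then result
  else
    let rows := (pvDictGetD graph "nodes" []).map pvRow
    let marked0 : List Bool := List.replicate rows.length false
    let marked := keywords.foldl
      (fun marked keyword =>
        let k := PySem.Str.lower keyword
        (List.zip marked rows).map
          (fun p => p.1 || PySem.Str.isIn k p.2.2.1 || PySem.Str.isIn k p.2.2.2))
      marked0
    (List.zip rows marked).foldl
      (fun result p => if p.2 then PySem.Set.add result p.1.1 else result) result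

-- ===== PRECONDITION & SPEC =====
def Spec_get_seed_nodes_from_keywords (graph : List (String × List (List (String × String)))) (keywords : List String) (out : List String) : Prop := out = get_seed_nodes_from_keywords_alt graph keywords
instance (graph : List (String × List (List (String × String)))) (keywords : List String) (out : List String) : Decidable (Spec_get_seed_nodes_from_keywords graph keywords out) := by unfold Spec_get_seed_nodes_from_keywords; infer_instance

-- ===== CLAIM (what is proved, stated in full; the proofs are below) =====
def Claim_equal_get_seed_nodes_from_keywords : Prop := ∀ (graph : List (String × List (List (String × String)))) (keywords : List String), Dom_get_seed_nodes_from_keywords graph keywords → Spec_get_seed_nodes_from_keywords graph keywords (get_seed_nodes_from_keywords graph keywords)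

-- ===== LEMMAS AND PROOFS =====

-- per-row match against one (already lowered) keyword, as B's marking pass tests it
def pvHit (k : String) (r : String × String × String) : Bool :=
  PySem.Str.isIn k r.2.1 || PySem.Str.isIn k r.2.2

-- zipping a list with a map of itself and mapping a binary function is a plain map
theorem pv_zip_map_self {α β γ : Type} (rows : List α) (f : α → β) (g : β → α → γ) :
    (List.zip (rows.map f) rows).map (fun p => g p.1 p.2) = rows.map (fun r => g (f r) r) := by
  induction rows with
  | nil => rfl
  | cons r t ih => simp only [List.map_cons, List.zip_cons_cons, ih]

-- the marking loop computes, per row, the initial mark OR-ed with "some keyword hits"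
theorem pv_mark_loop (ks : List String) (rows : List (String × String × String))
    (f : String × String × String → Bool) :
    ks.foldl
      (fun marked keyword =>
        let k := PySem.Str.lower keyword
        (List.zip marked rows).map
          (fun p => p.1 || PySem.Str.isIn k p.2.2.1 || PySem.Str.isIn k p.2.2.2))
      (rows.map f)
    = rows.map (fun r => f r || ks.any (fun kw => pvHit (PySem.Str.lower kw) r)) := by
  induction ks generalizing f with
  | nil => simp
  | cons k t ih =>
      simp only [List.foldl_cons]
      rw [pv_zip_map_self rows f
        (fun b r => b || PySem.Str.isIn (PySem.Str.lower k) r.2.1 || PySem.Str.isIn (PySem.Str.lower k) r.2.2)]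
      rw [ih (fun r => f r || PySem.Str.isIn (PySem.Str.lower k) r.2.1 || PySem.Str.isIn (PySem.Str.lower k) r.2.2)]
      apply List.map_congr_left
      intro r _
      simp [pvHit, List.any_cons, Bool.or_assoc]

-- collecting the rows zipped with their own marks is a single conditional fold over the rows
theorem pv_collect (rows : List (String × String × String)) (f : String × String × String → Bool)
    (s : PySem.Set String) :
    (List.zip rows (rows.map f)).foldl
      (fun result p => if p.2 then PySem.Set.add result p.1.1 else result) s
    = rows.foldl (fun result r => if f r then PySem.Set.add result r.1 else result) s := by
  induction rows generalizing s with
  | nil => rfl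
  | cons r t ih => simp only [List.map_cons, List.zip_cons_cons, List.foldl_cons, ih]

-- any() over the deduplicated lowered-keyword set equals any() over the lowered keyword list
theorem pv_any_ofList (ks : List String) (p : String → Bool) :
    (PySem.Set.ofList (ks.map PySem.Str.lower)).any p = ks.any (fun kw => p (PySem.Str.lower kw)) := by
  rw [Bool.eq_iff_iff]
  simp [List.any_eq_true, PySem.Set.mem_ofList]

theorem pv_ofList_ne_nil (k : String) (t : List String) :
    (PySem.Set.ofList ((k :: t).map PySem.Str.lower)).isEmpty = false := by
  rw [List.isEmpty_eq_false_iff_exists_mem]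
  exact ⟨PySem.Str.lower k, (PySem.Set.mem_ofList _ _).mpr (by simp)⟩

-- ===== VERDICT (by name: the statement is the Claim_ definition above) =====
theorem get_seed_nodes_from_keywords_spec : Claim_equal_get_seed_nodes_from_keywords := by
  intro graph keywords _
  show get_seed_nodes_from_keywords graph keywords = get_seed_nodes_from_keywords_alt graph keywords
  cases keywords with
  | nil => rfl
  | cons k t =>
      unfold get_seed_nodes_from_keywords get_seed_nodes_from_keywords_alt
      dsimp only
      rw [pv_ofList_ne_nil, if_neg (by simp), if_neg (by simp)]
      have hrep : List.replicate ((pvDictGetD graph "nodes" []).map pvRow).length false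
          = ((pvDictGetD graph "nodes" []).map pvRow).map (fun _ => false) := by
        simp [List.map_const']
      rw [hrep, pv_mark_loop, pv_collect, List.foldl_map]
      apply PySem.List.foldl_congr_mem
      intro s node _
      rw [pv_any_ofList]
      simp [pvRow, pvHit]
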